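-- pv_equiv track=rewrite | github.com/mihneasim/codility | 01/tape.py | solution
-- ===== SOURCE A (Python) =====
-- def solution(A):
--     # write your code in Python 2.7
--     sum_left = [0]
--     sum_right = [0]
--     for (ind, elem) in enumerate(A):
--         if ind == len(A) - 1:
--             continue
--         sum_left.append(sum_left[-1] + elem)
--     ind = len(A) - 1
--     while ind != 0:
--         sum_right.insert(0, sum_right[0] + A[ind])
--         ind -= 1
--     sum_left.pop(0)
--     sum_right.pop()
--     minimum = abs(sum_left[0]) - abs(sum_right[0])
--     min_ind = 0
--     #print sum_left
--     #print sum_right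
--     for p in range(len(sum_left)):
--         if minimum > abs(sum_left[p]) - abs(sum_right[p]):
--             minimum = abs(sum_left[p]) - abs(sum_right[p])
--             min_ind = p
--     return min_ind + 1
-- ===== SOURCE B (Python) =====
-- def solution(A):
--     # One pass: running prefix sum + total, instead of O(n^2) front-inserts.
--     total = sum(A)
--     left = 0
--     best_val = 0
--     best_ind = 0
--     p = 0
--     for x in A[:-1]:
--         p += 1
--         left += x
--         v = abs(left) - abs(total - left)
--         if best_ind == 0 or v < best_val:
--             best_val = v
--             best_ind = p
--     return best_ind
-- ===== Notes on version B (the rewrite author's own statement) =====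
-- stated objective: faster
-- what changed: B computes the total once and sweeps a single running prefix sum, tracking the first minimal split index on the fly, instead of A's building of an explicit prefix-sum list plus a suffix-sum list assembled by O(n) front-inserts and then a second minimum-scan pass.
import Mathlib
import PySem

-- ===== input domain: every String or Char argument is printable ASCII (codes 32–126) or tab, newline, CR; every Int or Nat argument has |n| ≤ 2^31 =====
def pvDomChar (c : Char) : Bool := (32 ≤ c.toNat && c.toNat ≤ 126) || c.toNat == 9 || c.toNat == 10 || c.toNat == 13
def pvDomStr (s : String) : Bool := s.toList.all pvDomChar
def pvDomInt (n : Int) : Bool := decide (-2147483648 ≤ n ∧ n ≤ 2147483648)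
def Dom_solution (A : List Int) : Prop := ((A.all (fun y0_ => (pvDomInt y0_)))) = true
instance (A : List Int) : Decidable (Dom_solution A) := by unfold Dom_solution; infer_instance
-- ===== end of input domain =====

-- B replaces A's quadratic front-insert suffix list by a single pass over a running
-- prefix sum against the total (objective: faster). Return values agree on all lists
-- of length ≥ 2 (Pre_); A raises IndexError on shorter lists.

-- ===== PORT A =====
-- the 'while ind != 0: sum_right.insert(0, sum_right[0] + A[ind]); ind -= 1' loop
def sumRightAux (A : List Int) : Nat → List Int → List Int
  | 0, acc => acc
  | ind+1, acc =>
      sumRightAux A ind ((acc.headD 0 + (PySem.List.pyGet? A ((ind : Int) + 1)).getD 0) :: acc)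

def solution (A : List Int) : Int :=
  let n : Int := A.length
  let sum_left := (PySem.List.enumerate A 0).foldl
      (fun acc (ie : Int × Int) =>
        if ie.1 = n - 1 then acc
        else acc ++ [(PySem.List.pyGet? acc (-1)).getD 0 + ie.2]) [0]
  let sum_right := sumRightAux A (A.length - 1) [0]
  let sl := sum_left.drop 1            -- sum_left.pop(0)
  let sr := sum_right.dropLast         -- sum_right.pop()
  let minimum := |(PySem.List.pyGet? sl 0).getD 0| - |(PySem.List.pyGet? sr 0).getD 0|
  let r := (PySem.List.pyRange 0 (sl.length : Int) 1).foldl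
      (fun (st : Int × Int) p =>
        if st.1 > |(PySem.List.pyGet? sl p).getD 0| - |(PySem.List.pyGet? sr p).getD 0|
        then (|(PySem.List.pyGet? sl p).getD 0| - |(PySem.List.pyGet? sr p).getD 0|, p)
        else st) (minimum, 0)
  r.2 + 1

-- ===== PORT B =====
structure BState where
  left : Int
  bestVal : Int
  bestInd : Int
  p : Int
deriving DecidableEq, Repr

def altStep (total : Int) (st : BState) (x : Int) : BState :=
  let p := st.p + 1
  let left := st.left + x
  let v := |left| - |total - left|
  if st.bestInd = 0 ∨ v < st.bestVal then ⟨left, v, p, p⟩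
  else ⟨left, st.bestVal, st.bestInd, p⟩

def solution_alt (A : List Int) : Int :=
  let total := A.sum
  ((PySem.List.slice A none (some (-1))).foldl (altStep total) ⟨0, 0, 0, 0⟩).bestInd

-- ===== PRECONDITION & SPEC =====
-- A raises IndexError on lists of length < 2 (sum_left[0] / A[-1] on an empty list); Pre_ excludes exactly those.
def Pre_solution (A : List Int) : Prop := 2 ≤ A.length
instance (A : List Int) : Decidable (Pre_solution A) := by unfold Pre_solution; infer_instance
def pvWitness_solution : List Int := [1, 2]

def Spec_solution (A : List Int) (out : Int) : Prop := out = solution_alt A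
instance (A : List Int) (out : Int) : Decidable (Spec_solution A out) := by unfold Spec_solution; infer_instance

-- ===== CLAIM (what is proved, stated in full; the proofs are below) =====
def Claim_equal_solution : Prop := ∀ (A : List Int), Dom_solution A → Pre_solution A → Spec_solution A (solution A)

-- ===== LEMMAS AND PROOFS =====

-- prefix sums starting after s (values of A's sum_left after the pop(0))
def scanSums (s : Int) : List Int → List Int
  | [] => []
  | x :: xs => (s + x) :: scanSums (s + x) xs

lemma scanSums_length (l : List Int) : ∀ s : Int, (scanSums s l).length = l.length := by
  induction l with
  | nil => intro s; rfl
  | cons x xs ih => intro s; simp [scanSums, ih]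

lemma scanSums_getElem? (l : List Int) : ∀ (s : Int) (p : Nat), p < l.length →
    (scanSums s l)[p]? = some (s + (l.take (p + 1)).sum) := by
  induction l with
  | nil => intro s p h; simp at h
  | cons x xs ih =>
    intro s p h
    cases p with
    | zero => simp [scanSums]
    | succ q =>
      simp only [scanSums, List.getElem?_cons_succ]
      rw [ih (s + x) q (by simpa using h)]
      simp [add_assoc]

-- A's sum_left loop (with the last-index skip removed) builds [0] ++ prefix sums
lemma leftFold_eq (l : List (Int × Int)) : ∀ (c : List Int) (s : Int),
    l.foldl (fun acc ie => acc ++ [(PySem.List.pyGet? acc (-1)).getD 0 + ie.2]) (c ++ [s])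
      = c ++ s :: scanSums s (l.map (·.2)) := by
  induction l with
  | nil => intro c s; simp [scanSums]
  | cons ie l ih =>
    intro c s
    simp only [List.foldl_cons, PySem.List.pyGet?_neg_one_append_singleton, Option.getD_some]
    have : (c ++ [s]) ++ [s + ie.2] = (c ++ [s]) ++ [s + ie.2] := rfl
    rw [ih (c ++ [s]) (s + ie.2)]
    simp [scanSums]

-- A's sum_right loop builds the suffix sums in front of acc
lemma sumRightAux_eq (A : List Int) : ∀ (k : Nat) (acc : List Int), k < A.length →
    acc.headD 0 = (A.drop (k + 1)).sum →
    sumRightAux A k acc = (List.range k).map (fun j => (A.drop (j + 1)).sum) ++ acc := by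
  intro k
  induction k with
  | zero => intro acc _ _; simp [sumRightAux]
  | succ k ih =>
    intro acc hk hhead
    have hk1 : k + 1 < A.length := hk
    have hc : ((k : Int) + 1) = (((k + 1 : Nat)) : Int) := by push_cast; ring
    have hget : (PySem.List.pyGet? A ((k : Int) + 1)).getD 0 = A[k + 1] := by
      rw [hc, PySem.List.pyGet?_natCast, List.getElem?_eq_getElem hk1]; rfl
    have hh2 : acc.headD 0 = (A.drop (k + 2)).sum := hhead
    have hdrop : (A.drop (k + 1)).sum = A[k + 1] + (A.drop (k + 2)).sum := by
      rw [List.drop_eq_getElem_cons hk1, List.sum_cons]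
    have hstep : acc.headD 0 + (PySem.List.pyGet? A ((k : Int) + 1)).getD 0
        = (A.drop (k + 1)).sum := by
      rw [hget, hh2, hdrop]; ring
    show sumRightAux A k
        ((acc.headD 0 + (PySem.List.pyGet? A ((k : Int) + 1)).getD 0) :: acc) = _
    rw [hstep, ih _ (by omega) (by simp), List.range_succ]
    simp

-- first-minimum selection over (value, index) pairs
def pick (ps : List (Int × Int)) (st : Int × Int) : Int × Int :=
  ps.foldl (fun st q => if st.1 > q.1 then q else st) st

-- the (value, index) pairs B's loop sees
def pairsFrom (T : Int) : Int → Int → List Int → List (Int × Int)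
  | _, _, [] => []
  | left, p, x :: xs =>
      (|left + x| - |T - (left + x)|, p + 1) :: pairsFrom T (left + x) (p + 1) xs

lemma alt_fold (T : Int) (C : List Int) : ∀ (left bv bi p : Int), bi ≠ 0 → 0 ≤ p →
    ((C.foldl (altStep T) ⟨left, bv, bi, p⟩).bestInd)
      = (pick (pairsFrom T left p C) (bv, bi)).2 := by
  induction C with
  | nil => intro left bv bi p _ _; rfl
  | cons x C ih =>
    intro left bv bi p hbi hp
    simp only [List.foldl_cons, altStep, pairsFrom, pick, List.foldl_cons]
    by_cases hv : |left + x| - |T - (left + x)| < bv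
    · rw [if_pos (Or.inr hv), if_pos (by simpa using hv)]
      exact ih (left + x) _ (p + 1) (p + 1) (by omega) (by omega)
    · rw [if_neg (by tauto), if_neg (by simpa using hv)]
      exact ih (left + x) bv bi (p + 1) hbi (by omega)

lemma pairsFrom_eq (T : Int) (C : List Int) : ∀ (left p : Int),
    pairsFrom T left p C = (List.range C.length).map
      (fun k => (|left + (C.take (k + 1)).sum| - |T - (left + (C.take (k + 1)).sum)|,
                 p + 1 + (k : Int))) := by
  induction C with
  | nil => intro left p; rfl
  | cons x C ih =>
    intro left p
    simp only [pairsFrom, List.length_cons, List.range_succ_eq_map, List.map_cons,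
      List.map_map]
    congr 1
    · simp
    · rw [ih (left + x) (p + 1)]
      apply List.map_congr_left
      intro k _
      simp only [Function.comp_apply, Nat.succ_eq_add_one, List.take_succ_cons,
        List.sum_cons, Prod.mk.injEq]
      constructor
      · ring_nf
      · push_cast; ring

-- index shift: pick over pairs with all indices +1 and start index +1
lemma pick_shift (ps : List (Int × Int)) : ∀ (bv bi : Int),
    pick (ps.map (fun q => (q.1, q.2 + 1))) (bv, bi + 1)
      = ((pick ps (bv, bi)).1, (pick ps (bv, bi)).2 + 1) := by
  induction ps with
  | nil => intro bv bi; rfl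
  | cons q ps ih =>
    intro bv bi
    simp only [pick, List.map_cons, List.foldl_cons]
    by_cases h : bv > q.1
    · rw [if_pos h, if_pos h]; exact ih q.1 q.2
    · rw [if_neg h, if_neg h]; exact ih bv bi

theorem solution_eq_alt (A : List Int) (h : 2 ≤ A.length) : solution A = solution_alt A := by
  obtain ⟨n, hn⟩ : ∃ n, A.length = n + 2 := ⟨A.length - 2, by omega⟩
  set B := A.dropLast with hB
  have hBlen : B.length = n + 1 := by simp [hB, hn]
  have hBne : B ≠ [] := by intro h'; rw [h'] at hBlen; simp at hBlen
  have hAne : A ≠ [] := by intro h'; rw [h'] at hn; simp at hn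
  have hAsplit : A = B ++ [A.getLast hAne] := (List.dropLast_append_getLast _).symm
  set T := A.sum with hT
  obtain ⟨b0, B', hBcons⟩ : ∃ b0 B', B = b0 :: B' := by
    cases hb : B with
    | nil => exact absurd hb hBne
    | cons y ys => exact ⟨y, ys, rfl⟩
  have hB'len : B'.length = n := by rw [hBcons] at hBlen; simpa using hBlen
  have htake : ∀ k : Nat, k ≤ n + 1 → B.take k = A.take k := by
    intro k hk
    rw [hB, List.dropLast_eq_take, List.take_take]
    congr 1
    omega
  set P : Nat → Int := fun k => (A.take k).sum with hP
  set v : Nat → Int := fun p => |P (p + 1)| - |T - P (p + 1)| with hv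
  ----------------------------------------------------------------
  -- RHS: the one-pass loop
  ----------------------------------------------------------------
  have hslice : PySem.List.slice A none (some (-1)) = B := PySem.List.slice_to_neg_one A
  have hb0 : b0 = P 1 := by
    have h1 : (B.take 1).sum = P 1 := by rw [htake 1 (by omega)]
    rw [hBcons] at h1
    simpa using h1
  have hBsum : ∀ k : Nat, k < n → b0 + (B'.take (k + 1)).sum = P (k + 2) := by
    intro k hk
    have h2 : (B.take (k + 2)).sum = P (k + 2) := by rw [htake (k + 2) (by omega)]
    rw [hBcons] at h2
    simpa using h2
  have hinit : |b0| - |T - b0| = v 0 := by simp [hv, hb0]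
  have hlist : (List.range n).map
        (fun k => (|b0 + (B'.take (k + 1)).sum| - |T - (b0 + (B'.take (k + 1)).sum)|,
                   (1 : Int) + 1 + (k : Int)))
      = (List.range n).map (fun k => (v (k + 1), (k : Int) + 2)) := by
    apply List.map_congr_left
    intro k hk
    rw [hBsum k (List.mem_range.mp hk)]
    rw [Prod.mk.injEq]
    constructor
    · simp [hv]
    · ring
  have hrhs : solution_alt A =
      (pick ((List.range n).map (fun k => (v (k + 1), (k : Int) + 2))) (v 0, 1)).2 := by
    simp only [solution_alt]
    rw [hslice, hBcons, List.foldl_cons]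
    have hstep1 : altStep T ⟨0, 0, 0, 0⟩ b0 = ⟨b0, |b0| - |T - b0|, 1, 1⟩ := by
      simp [altStep]
    rw [hstep1, alt_fold T B' b0 (|b0| - |T - b0|) 1 1 (by omega) (by omega),
        pairsFrom_eq, hB'len, hlist, hinit]
  ----------------------------------------------------------------
  -- LHS: sum_left
  ----------------------------------------------------------------
  have henum : PySem.List.enumerate A 0
      = PySem.List.enumerate B 0 ++ PySem.List.enumerate [A.getLast hAne] (0 + (B.length : Int)) := by
    conv_lhs => rw [hAsplit]
    rw [PySem.List.enumerate_append]
  have hsum_left : (PySem.List.enumerate A 0).foldl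
      (fun acc (ie : Int × Int) =>
        if ie.1 = (A.length : Int) - 1 then acc
        else acc ++ [(PySem.List.pyGet? acc (-1)).getD 0 + ie.2]) [0]
      = 0 :: scanSums 0 B := by
    rw [henum, List.foldl_append]
    have hskip : ∀ (acc : List Int), ∀ ie ∈ PySem.List.enumerate B 0,
        (if ie.1 = (A.length : Int) - 1 then acc
         else acc ++ [(PySem.List.pyGet? acc (-1)).getD 0 + ie.2])
        = acc ++ [(PySem.List.pyGet? acc (-1)).getD 0 + ie.2] := by
      intro acc ie hmem
      obtain ⟨k, hklt, hkeq⟩ := (PySem.List.mem_enumerate_iff B 0 ie).mp hmem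
      rw [if_neg]
      rw [hkeq]
      have hkn : k < n + 1 := by rw [hBlen] at hklt; exact hklt
      simp only [hn]
      intro hcontra
      simp at hcontra
      omega
    rw [PySem.List.foldl_congr_mem _ _ _ _ hskip]
    have h0 : ([0] : List Int) = [] ++ [0] := rfl
    rw [h0, leftFold_eq, PySem.List.map_snd_enumerate]
    have hlast : ((0 : Int) + (B.length : Int)) = (A.length : Int) - 1 := by
      rw [hBlen, hn]; push_cast; ring
    rw [PySem.List.enumerate_cons, PySem.List.enumerate_nil, List.foldl_cons,
        List.foldl_nil, if_pos hlast]
    rfl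
  have hsl_len : (scanSums 0 B).length = n + 1 := by rw [scanSums_length, hBlen]
  have hsl_get : ∀ p : Nat, p ≤ n → (scanSums 0 B)[p]? = some (P (p + 1)) := by
    intro p hp
    rw [scanSums_getElem? B 0 p (by omega), htake (p + 1) (by omega)]
    simp [hP]
  ----------------------------------------------------------------
  -- LHS: sum_right
  ----------------------------------------------------------------
  have hAlen1 : A.length - 1 = n + 1 := by omega
  have hsum_right : sumRightAux A (A.length - 1) [0]
      = (List.range (n + 1)).map (fun j => (A.drop (j + 1)).sum) ++ [0] := by
    rw [hAlen1]
    exact sumRightAux_eq A (n + 1) [0] (by omega) (by simp [hn, List.drop_eq_nil_of_le])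
  have hsr_get : ∀ p : Nat, p ≤ n →
      ((List.range (n + 1)).map (fun j => (A.drop (j + 1)).sum))[p]? = some (T - P (p + 1)) := by
    intro p hp
    rw [List.getElem?_map, List.getElem?_range (by omega)]
    simp only [Option.map_some, Option.some.injEq]
    have hsplit := List.sum_take_add_sum_drop A (p + 1)
    simp only [hP, hT]
    omega
  ----------------------------------------------------------------
  -- LHS: the selection loop
  ----------------------------------------------------------------
  have key : solution A =
      (pick ((List.range (n + 1)).map (fun p => (v p, (p : Int)))) (v 0, 0)).2 + 1 := by
    simp only [solution]
    rw [hsum_left, hsum_right, List.dropLast_concat, List.drop_succ_cons, List.drop_zero,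
        hsl_len]
    have hmin : |(PySem.List.pyGet? (scanSums 0 B) 0).getD 0|
        - |(PySem.List.pyGet? ((List.range (n + 1)).map (fun j => (A.drop (j + 1)).sum)) 0).getD 0|
        = v 0 := by
      rw [PySem.List.pyGet?_zero, PySem.List.pyGet?_zero, hsl_get 0 (by omega),
          hsr_get 0 (by omega)]
      simp [hv]
    rw [hmin]
    have hrange : PySem.List.pyRange 0 ((n : Int) + 1) 1
        = (List.range (n + 1)).map (fun k : Nat => (k : Int)) := by
      have hr := PySem.List.pyRange_zero_natCast (n + 1)
      push_cast at hr
      exact hr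
    push_cast
    rw [hrange, List.foldl_map]
    congr 1
    simp only [pick, List.foldl_map]
    congr 1
    apply PySem.List.foldl_congr_mem
    intro st q hq'
    have hq : q < n + 1 := List.mem_range.mp hq'
    have hslv : (PySem.List.pyGet? (scanSums 0 B) ((q : Nat) : Int)).getD 0 = P (q + 1) := by
      rw [PySem.List.pyGet?_natCast, hsl_get q (by omega)]; rfl
    have hsrv : (PySem.List.pyGet? ((List.range (n + 1)).map (fun j => (A.drop (j + 1)).sum))
        ((q : Nat) : Int)).getD 0 = T - P (q + 1) := by
      rw [PySem.List.pyGet?_natCast, hsr_get q (by omega)]; rfl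
    simp only [hslv, hsrv, hv]
  ----------------------------------------------------------------
  -- connect the two picks
  ----------------------------------------------------------------
  rw [key, hrhs]
  have hpeel : pick ((List.range (n + 1)).map (fun p => (v p, (p : Int)))) (v 0, 0)
      = pick ((List.range n).map (fun k => (v (k + 1), (k : Int) + 1))) (v 0, 0) := by
    rw [List.range_succ_eq_map, List.map_cons, List.map_map]
    have hmapeq : (List.range n).map ((fun p => (v p, ((p : Nat) : Int))) ∘ Nat.succ)
        = (List.range n).map (fun k => (v (k + 1), (k : Int) + 1)) := by
      apply List.map_congr_left
      intro k _
      simp only [Function.comp_apply, Nat.succ_eq_add_one, Prod.mk.injEq, true_and]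
      push_cast
      ring
    rw [hmapeq]
    simp only [pick, List.foldl_cons, Nat.cast_zero, gt_iff_lt, lt_self_iff_false, ite_self]
  rw [hpeel]
  have hmapshift : (List.range n).map (fun k => (v (k + 1), (k : Int) + 2))
      = ((List.range n).map (fun k => (v (k + 1), (k : Int) + 1))).map
          (fun q => (q.1, q.2 + 1)) := by
    rw [List.map_map]
    apply List.map_congr_left
    intro k _
    simp only [Function.comp_apply, Prod.mk.injEq, true_and]
    ring
  rw [hmapshift]
  have hshift := pick_shift ((List.range n).map (fun k => (v (k + 1), (k : Int) + 1))) (v 0) 0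
  simp only [zero_add] at hshift
  rw [hshift]

-- ===== VERDICT (by name: the statement is the Claim_ definition above) =====
theorem solution_spec : Claim_equal_solution := by
  intro A _ hpre
  unfold Spec_solution
  exact solution_eq_alt A hpre
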